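-- pv_equiv track=rewrite | github.com/alzorix/homework | variantNOW/23.py | F
-- ===== SOURCE A (Python) =====
-- def F(start=48,end=4,seventeen=0,twentyfive=0):
--     if start == end and seventeen and twentyfive:
--         return 1
--     if start <= end :
--         return 0
--
--     if start == 17:
--         seventeen+=1
--     if start == 25:
--         twentyfive+=1
--
--     if start == 15:
--         return 0
--
--     return F(start-2,end,seventeen,twentyfive) + F(start-3,end,seventeen,twentyfive) + F(start//3,end,seventeen,twentyfive)
-- ===== SOURCE B (Python) =====
-- def F(start=48, end=4, seventeen=0, twentyfive=0):
--     # Bottom-up DP: classify paths from s to end by whether they pass node 17 / node 25,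
--     # then weight the four classes by the truthiness test A applies at the end.
--     def indicator(a, b):
--         return 1 if a and b else 0
--     if start <= end:
--         return indicator(seventeen, twentyfive) if start == end else 0
--     if start == 15:
--         return 0  # node 15 is a dead end: no paths leave it
--     table = {}
--     def cell(s):
--         if s <= end:
--             return (1, 0, 0, 0) if s == end else (0, 0, 0, 0)
--         return table[s]
--     for s in range(end + 1, start + 1):
--         if s == 15:
--             table[s] = (0, 0, 0, 0)
--             continue
--         x = cell(s - 2)
--         y = cell(s - 3)
--         z = cell(s // 3)
--         c00, c01, c10, c11 = (x[0] + y[0] + z[0], x[1] + y[1] + z[1],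
--                               x[2] + y[2] + z[2], x[3] + y[3] + z[3])
--         if s == 17:
--             c00, c01, c10, c11 = 0, 0, c00 + c10, c01 + c11
--         if s == 25:
--             c00, c01, c10, c11 = 0, c00 + c01, 0, c10 + c11
--         table[s] = (c00, c01, c10, c11)
--     c = table[start]
--     return (c[0] * indicator(seventeen, twentyfive)
--             + c[1] * indicator(seventeen, twentyfive + 1)
--             + c[2] * indicator(seventeen + 1, twentyfive)
--             + c[3] * indicator(seventeen + 1, twentyfive + 1))
-- ===== Notes on version B (the rewrite author's own statement) =====
-- stated objective: alternative
-- what changed: Replaces the exponential three-way recursion with a bottom-up table over end..start that counts paths classified by whether they pass node 17 / node 25, then weights the four classes by the final truthiness test.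
import Mathlib
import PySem

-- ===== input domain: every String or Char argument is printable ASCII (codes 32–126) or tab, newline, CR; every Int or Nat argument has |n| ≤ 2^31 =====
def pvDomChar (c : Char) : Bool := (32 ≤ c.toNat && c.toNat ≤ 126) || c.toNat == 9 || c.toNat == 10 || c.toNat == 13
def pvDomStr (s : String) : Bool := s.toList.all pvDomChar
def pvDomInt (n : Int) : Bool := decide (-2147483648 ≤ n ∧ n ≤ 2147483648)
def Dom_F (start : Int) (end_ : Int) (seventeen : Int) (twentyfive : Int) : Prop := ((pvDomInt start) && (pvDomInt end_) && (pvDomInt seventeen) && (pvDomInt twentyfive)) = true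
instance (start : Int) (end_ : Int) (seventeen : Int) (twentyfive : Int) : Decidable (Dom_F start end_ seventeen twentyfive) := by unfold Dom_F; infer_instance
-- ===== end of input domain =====

-- B replaces A's three-way recursion by a bottom-up table over end..start that counts paths
-- classified by passage through nodes 17 / 25, weighted at the end by the final truthiness test.


-- ===== PORT A =====
-- literal transliteration of A; the Nat fuel only makes the recursion total (A diverges
-- where the fuel could run out, and those inputs are excluded by Pre_F)
def fAux : Nat → Int → Int → Int → Int → Int
  | 0, _, _, _, _ => 0
  | n + 1, start, end_, seventeen, twentyfive =>
    if start = end_ ∧ seventeen ≠ 0 ∧ twentyfive ≠ 0 then 1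
    else if start ≤ end_ then 0
    else
      let seventeen := if start = 17 then seventeen + 1 else seventeen
      let twentyfive := if start = 25 then twentyfive + 1 else twentyfive
      if start = 15 then 0
      else
        fAux n (start - 2) end_ seventeen twentyfive
          + fAux n (start - 3) end_ seventeen twentyfive
          + fAux n (PySem.Int.floordiv start 3) end_ seventeen twentyfive

def F (start : Int) (end_ : Int) (seventeen : Int) (twentyfive : Int) : Int :=
  fAux ((start - end_).toNat + 1) start end_ seventeen twentyfive

-- ===== PORT B =====
-- indicator(a, b) = 1 if a and b else 0
def pvInd (a b : Int) : Int := if a ≠ 0 ∧ b ≠ 0 then 1 else 0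

-- cell(s): base rows below/at end, else table[s] (within Pre_F the key is always present;
-- the default only makes the lookup total)
def pvCell (end_ : Int) (table : PySem.Dict Int (Int × Int × Int × Int)) (s : Int) :
    Int × Int × Int × Int :=
  if s ≤ end_ then (if s = end_ then (1, 0, 0, 0) else (0, 0, 0, 0))
  else table.getD s (0, 0, 0, 0)

-- the componentwise sum x + y + z of the three predecessor rows
def pvAdd3 (x y z : Int × Int × Int × Int) : Int × Int × Int × Int :=
  (x.1 + y.1 + z.1, x.2.1 + y.2.1 + z.2.1, x.2.2.1 + y.2.2.1 + z.2.2.1, x.2.2.2 + y.2.2.2 + z.2.2.2)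

-- the 'if s == 17: …' reclassification line of Source B
def pvSh17 (s : Int) (c : Int × Int × Int × Int) : Int × Int × Int × Int :=
  if s = 17 then (0, 0, c.1 + c.2.2.1, c.2.1 + c.2.2.2) else c

-- the 'if s == 25: …' reclassification line of Source B
def pvSh25 (s : Int) (c : Int × Int × Int × Int) : Int × Int × Int × Int :=
  if s = 25 then (0, c.1 + c.2.1, 0, c.2.2.1 + c.2.2.2) else c

-- one iteration of Source B's for-loop body
def pvStep (end_ : Int) (table : PySem.Dict Int (Int × Int × Int × Int)) (s : Int) :
    PySem.Dict Int (Int × Int × Int × Int) :=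
  if s = 15 then table.insert s (0, 0, 0, 0)
  else
    table.insert s
      (pvSh25 s (pvSh17 s
        (pvAdd3 (pvCell end_ table (s - 2)) (pvCell end_ table (s - 3))
          (pvCell end_ table (PySem.Int.floordiv s 3)))))

def F_alt (start : Int) (end_ : Int) (seventeen : Int) (twentyfive : Int) : Int :=
  if start ≤ end_ then (if start = end_ then pvInd seventeen twentyfive else 0)
  else if start = 15 then 0   -- node 15 is a dead end: no paths leave it
  else
    let table := (PySem.List.pyRange (end_ + 1) (start + 1) 1).foldl (pvStep end_) PySem.Dict.empty
    let c := table.getD start (0, 0, 0, 0)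
    c.1 * pvInd seventeen twentyfive + c.2.1 * pvInd seventeen (twentyfive + 1)
      + c.2.2.1 * pvInd (seventeen + 1) twentyfive
      + c.2.2.2 * pvInd (seventeen + 1) (twentyfive + 1)

-- ===== PRECONDITION & SPEC =====
-- Pre_F excludes end_ < 0 with start > end_ and start ≠ 15: there A's recursion never
-- terminates (start//3 loops at 0 or -1 and never reaches end_), so A raises RecursionError.
def Pre_F (start : Int) (end_ : Int) (seventeen : Int) (twentyfive : Int) : Prop :=
  0 ≤ end_ ∨ start ≤ end_ ∨ start = 15
instance (start : Int) (end_ : Int) (seventeen : Int) (twentyfive : Int) : Decidable (Pre_F start end_ seventeen twentyfive) := by unfold Pre_F; infer_instance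

def pvWitness_F : Int × Int × Int × Int := (48, 4, 0, 0)

def Spec_F (start : Int) (end_ : Int) (seventeen : Int) (twentyfive : Int) (out : Int) : Prop := out = F_alt start end_ seventeen twentyfive
instance (start : Int) (end_ : Int) (seventeen : Int) (twentyfive : Int) (out : Int) : Decidable (Spec_F start end_ seventeen twentyfive out) := by unfold Spec_F; infer_instance

-- ===== CLAIM (what is proved, stated in full; the proofs are below) =====
def Claim_equal_F : Prop := ∀ (start : Int) (end_ : Int) (seventeen : Int) (twentyfive : Int), Dom_F start end_ seventeen twentyfive → Pre_F start end_ seventeen twentyfive → Spec_F start end_ seventeen twentyfive (F start end_ seventeen twentyfive)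

-- ===== LEMMAS AND PROOFS =====

theorem pvFdiv_lt (s : Int) (hs : 1 ≤ s) :
    0 ≤ PySem.Int.floordiv s 3 ∧ PySem.Int.floordiv s 3 < s := by
  rw [PySem.Int.floordiv_eq_ediv_of_pos (by norm_num)]
  constructor
  · exact Int.ediv_nonneg (by omega) (by norm_num)
  · rw [Int.ediv_lt_iff_lt_mul (by norm_num)]
    omega

-- the mathematical table row: counts of A-paths from s down to end_, classified by
-- whether they pass node 17 (third/fourth components) / node 25 (second/fourth components)
def cvec (end_ s : Int) : Int × Int × Int × Int :=
  if end_ < 0 then (0, 0, 0, 0)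
  else if s ≤ end_ then (if s = end_ then (1, 0, 0, 0) else (0, 0, 0, 0))
  else if s = 15 then (0, 0, 0, 0)
  else
    pvSh25 s (pvSh17 s
      (pvAdd3 (cvec end_ (s - 2)) (cvec end_ (s - 3)) (cvec end_ (PySem.Int.floordiv s 3))))
termination_by (s - end_).toNat
decreasing_by
  · omega
  · omega
  · have := pvFdiv_lt s (by omega); omega

-- below node 17 no path can pass node 17
theorem Z17 (end_ s : Int) (he : 0 ≤ end_) (hs : s < 17) :
    (cvec end_ s).2.2.1 = 0 ∧ (cvec end_ s).2.2.2 = 0 := by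
  rw [cvec]
  by_cases h2 : s ≤ end_
  · simp only [show ¬ end_ < 0 by omega, if_false, h2, if_true]
    by_cases hse : s = end_ <;> simp [hse]
  · simp only [show ¬ end_ < 0 by omega, if_false, h2, if_true]
    by_cases h15 : s = 15
    · simp [h15]
    · have hdiv := pvFdiv_lt s (by omega)
      have i1 := Z17 end_ (s - 2) he (by omega)
      have i2 := Z17 end_ (s - 3) he (by omega)
      have i3 := Z17 end_ (PySem.Int.floordiv s 3) he (by omega)
      rw [if_neg h15]
      simp only [pvSh17, pvSh25, show s ≠ 17 by omega, show s ≠ 25 by omega, if_false, pvAdd3]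
      omega
termination_by (s - end_).toNat
decreasing_by
  · omega
  · omega
  · have := pvFdiv_lt s (by omega); omega

-- below node 25 no path can pass node 25
theorem Z25 (end_ s : Int) (he : 0 ≤ end_) (hs : s < 25) :
    (cvec end_ s).2.1 = 0 ∧ (cvec end_ s).2.2.2 = 0 := by
  rw [cvec]
  by_cases h2 : s ≤ end_
  · simp only [show ¬ end_ < 0 by omega, if_false, h2, if_true]
    by_cases hse : s = end_ <;> simp [hse]
  · simp only [show ¬ end_ < 0 by omega, if_false, h2, if_true]
    by_cases h15 : s = 15
    · simp [h15]
    · have hdiv := pvFdiv_lt s (by omega)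
      have i1 := Z25 end_ (s - 2) he (by omega)
      have i2 := Z25 end_ (s - 3) he (by omega)
      have i3 := Z25 end_ (PySem.Int.floordiv s 3) he (by omega)
      rw [if_neg h15]
      by_cases h17 : s = 17
      · subst h17
        have hf3 : PySem.Int.floordiv (17 : Int) 3 = 5 := by decide
        have j1 := Z25 end_ 15 he (by norm_num)
        have j2 := Z25 end_ 14 he (by norm_num)
        have j3 := Z25 end_ 5 he (by norm_num)
        simp only [hf3, show (17 : Int) - 2 = 15 by norm_num, show (17 : Int) - 3 = 14
          by norm_num, pvSh17, pvSh25, if_true, show (17 : Int) ≠ 25 by norm_num, if_false,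
          pvAdd3]
        exact ⟨trivial, by omega⟩
      · simp only [pvSh17, pvSh25, h17, if_false, show s ≠ 25 by omega, if_false, pvAdd3]
        omega
termination_by (s - end_).toNat
decreasing_by
  all_goals first
    | omega
    | (have := pvFdiv_lt s (by omega); omega)

-- the weighting of a classified row by the final truthiness test
def pvDot (c : Int × Int × Int × Int) (a b : Int) : Int :=
  c.1 * pvInd a b + c.2.1 * pvInd a (b + 1) + c.2.2.1 * pvInd (a + 1) b
    + c.2.2.2 * pvInd (a + 1) (b + 1)

-- A's recursion computes the weighted classified count
theorem LA (fuel : Nat) (s e a b : Int) (he : 0 ≤ e) (hf : (s - e).toNat < fuel) :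
    fAux fuel s e a b = pvDot (cvec e s) a b := by
  induction fuel generalizing s a b with
  | zero => omega
  | succ n ih =>
    rw [fAux, cvec]
    simp only [show ¬ e < 0 by omega, if_false]
    by_cases h2 : s ≤ e
    · simp only [h2, if_true]
      by_cases hse : s = e
      · by_cases hab : a ≠ 0 ∧ b ≠ 0 <;>
          simp [hse, hab, pvDot, pvInd]
      · simp [hse, pvDot, pvInd]
    · simp only [h2, if_false]
      have hs1 : 1 ≤ s := by omega
      have hdiv := pvFdiv_lt s hs1
      have hme : (1:Int) ≤ s - e := by omega
      have r1 := ih (s - 2) (if s = 17 then a + 1 else a) (if s = 25 then b + 1 else b) (by omega)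
      have r2 := ih (s - 3) (if s = 17 then a + 1 else a) (if s = 25 then b + 1 else b) (by omega)
      have r3 := ih (PySem.Int.floordiv s 3) (if s = 17 then a + 1 else a)
        (if s = 25 then b + 1 else b) (by omega)
      have hne : ¬ (s = e ∧ a ≠ 0 ∧ b ≠ 0) := by intro h; exact h2 (le_of_eq h.1)
      rw [if_neg hne]
      by_cases h15 : s = 15
      · rw [if_pos h15, if_pos h15]
        simp [pvDot, pvInd]
      · rw [if_neg h15, if_neg h15]
        rw [r1, r2, r3]
        by_cases h17 : s = 17
        · -- below 17 the pass-17 classes are empty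
          subst h17
          have hf3 : PySem.Int.floordiv (17 : Int) 3 = 5 := by decide
          have z1 := Z17 e 15 he (by norm_num)
          have z2 := Z17 e 14 he (by norm_num)
          have z3 := Z17 e 5 he (by norm_num)
          simp only [hf3, show (17 : Int) - 2 = 15 by norm_num, show (17 : Int) - 3 = 14
            by norm_num, pvSh17, pvSh25, if_true, show (17 : Int) ≠ 25 by norm_num,
            if_false, pvAdd3, pvDot, pvInd]
          by_cases hb : b = 0 <;> by_cases hb1 : b + 1 = 0 <;>
            by_cases ha1 : a + 1 = 0 <;> by_cases ha2 : a + 1 + 1 = 0 <;>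
            simp [hb, hb1, ha1, ha2] <;> omega
        · by_cases h25 : s = 25
          · -- below 25 the pass-25 classes are empty
            subst h25
            have hf3 : PySem.Int.floordiv (25 : Int) 3 = 8 := by decide
            have z1 := Z25 e 23 he (by norm_num)
            have z2 := Z25 e 22 he (by norm_num)
            have z3 := Z25 e 8 he (by norm_num)
            simp only [hf3, show (25 : Int) - 2 = 23 by norm_num, show (25 : Int) - 3 = 22
              by norm_num, pvSh17, pvSh25, if_true, show (25 : Int) ≠ 17 by norm_num,
              if_false, pvAdd3, pvDot, pvInd]
            by_cases ha : a = 0 <;> by_cases ha1 : a + 1 = 0 <;>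
              by_cases hb1 : b + 1 = 0 <;> by_cases hb2 : b + 1 + 1 = 0 <;>
              simp [ha, ha1, hb1, hb2] <;> omega
          · simp only [h17, h25, if_false, pvSh17, pvSh25, if_false, pvAdd3, pvDot]
            ring

-- B's table holds exactly the classified rows
theorem LB (e : Int) (he : 0 ≤ e) (n : Nat) :
    ∀ k : Int, e < k → k ≤ e + n →
      ((PySem.List.pyRange (e + 1) (e + 1 + n) 1).foldl (pvStep e) PySem.Dict.empty).getD k
          (0, 0, 0, 0) = cvec e k := by
  induction n with
  | zero => intro k hk1 hk2; omega
  | succ n ih =>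
    intro k hk1 hk2
    have hsplit : PySem.List.pyRange (e + 1) (e + 1 + (n + 1 : Nat)) 1
        = PySem.List.pyRange (e + 1) (e + 1 + n) 1 ++ [e + 1 + n] := by
      have : (e + 1 + ((n : Int) + 1)) = (e + 1 + n) + 1 := by ring
      push_cast
      rw [this, PySem.List.pyRange_one_succ_right (by omega)]
    rw [hsplit, List.foldl_append]
    set T := (PySem.List.pyRange (e + 1) (e + 1 + n) 1).foldl (pvStep e) PySem.Dict.empty with hT
    have hs1 : (1 : Int) ≤ e + 1 + n := by omega
    have hdiv := pvFdiv_lt (e + 1 + n) hs1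
    have hcell : ∀ t : Int, t < e + 1 + n → pvCell e T t = cvec e t := by
      intro t ht
      rw [pvCell]
      by_cases hle : t ≤ e
      · rw [cvec]
        simp only [show ¬ e < 0 by omega, if_false, hle, if_true]
      · simp only [hle, if_false]
        exact ih t (by omega) (by omega)
    simp only [List.foldl_cons, List.foldl_nil]
    simp only [pvStep]
    by_cases h15 : e + 1 + n = 15
    · rw [if_pos h15, PySem.Dict.getD_insert]
      by_cases hk : k = e + 1 + n
      · simp only [hk, if_true]
        rw [cvec]
        simp only [show ¬ e < 0 by omega, if_false, show ¬ (e + 1 + (n:Int)) ≤ e by omega,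
          if_false, h15, if_true]
        rw [if_neg (show ¬ (15 : Int) ≤ e by omega)]
      · simp only [hk, if_false]
        exact ih k hk1 (by omega)
    · rw [if_neg h15, PySem.Dict.getD_insert]
      by_cases hk : k = e + 1 + n
      · simp only [hk, if_true]
        rw [hcell _ (by omega), hcell _ (by omega), hcell _ (by omega)]
        conv_rhs => rw [cvec]
        simp only [show ¬ e < 0 by omega, if_false, show ¬ (e + 1 + (n:Int)) ≤ e by omega,
          if_false, h15, if_true]
      · simp only [hk, if_false]
        exact ih k hk1 (by omega)

-- ===== VERDICT (by name: the statement is the Claim_ definition above) =====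
theorem F_spec : Claim_equal_F := by
  intro start end_ seventeen twentyfive _hdom hpre
  unfold Spec_F F F_alt
  by_cases hle : start ≤ end_
  · simp only [hle, if_true]
    rw [fAux]
    by_cases hse : start = end_
    · by_cases hab : seventeen ≠ 0 ∧ twentyfive ≠ 0 <;> simp [hse, hab, pvInd, hle]
    · simp [hse, hle]
  · by_cases h15 : start = 15
    · subst h15
      simp only [hle, if_false, if_true]
      rw [fAux]
      simp [show (15:Int) ≠ end_ by omega, hle]
    · have he : 0 ≤ end_ := by rcases hpre with h | h | h <;> omega
      simp only [hle, h15, if_false]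
      have hn : start + 1 = end_ + 1 + ((start - end_).toNat : Int) := by omega
      rw [hn, LA ((start - end_).toNat + 1) start end_ seventeen twentyfive he (by omega),
        LB end_ he (start - end_).toNat start (by omega) (by omega)]
      rw [pvDot]
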